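-- pv_equiv track=rewrite | github.com/247otpl/shivam-nctrls | backend/modules/inventory/adapters/tplink.py | parse
-- ===== SOURCE A (Python) =====
-- def parse(raw_output: str):
--
--     data = {
--         "hostname": "",
--         "vendor": "tp-link",
--         "platform": "",
--         "model": "",
--         "serial_number": "",
--         "os_version": "",
--         "hardware_version": ""
--     }
--
--     for line in raw_output.splitlines():
--
--         if "System Name" in line:
--             data["hostname"] = line.split("-")[-1].strip()
--
--         if "Hardware Version" in line:
--             data["hardware_version"] = line.split("-")[-1].strip()
--
--         if "Software Version" in line:
--             data["os_version"] = line.split("-")[-1].strip()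
--
--         if "Serial Number" in line:
--             data["serial_number"] = line.split("-")[-1].strip()
--
--     return data
-- ===== SOURCE B (Python) =====
-- def parse(raw_output: str):
--     lines = raw_output.splitlines()
--     data = {
--         "hostname": "",
--         "vendor": "tp-link",
--         "platform": "",
--         "model": "",
--         "serial_number": "",
--         "os_version": "",
--         "hardware_version": ""
--     }
--     markers = [
--         ("System Name", "hostname"),
--         ("Hardware Version", "hardware_version"),
--         ("Software Version", "os_version"),
--         ("Serial Number", "serial_number"),
--     ]
--     for marker, key in markers:
--         matches = [line.split("-")[-1].strip() for line in lines if marker in line]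
--         data[key] = matches[-1] if matches else ""
--     return data
-- ===== Notes on version B (the rewrite author's own statement) =====
-- stated objective: idiomatic
-- what changed: Replaces the single pass with four hard-coded if-blocks by a marker-to-key table driving one per-field scan each (comprehension of matching lines, last match wins).
import Mathlib
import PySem

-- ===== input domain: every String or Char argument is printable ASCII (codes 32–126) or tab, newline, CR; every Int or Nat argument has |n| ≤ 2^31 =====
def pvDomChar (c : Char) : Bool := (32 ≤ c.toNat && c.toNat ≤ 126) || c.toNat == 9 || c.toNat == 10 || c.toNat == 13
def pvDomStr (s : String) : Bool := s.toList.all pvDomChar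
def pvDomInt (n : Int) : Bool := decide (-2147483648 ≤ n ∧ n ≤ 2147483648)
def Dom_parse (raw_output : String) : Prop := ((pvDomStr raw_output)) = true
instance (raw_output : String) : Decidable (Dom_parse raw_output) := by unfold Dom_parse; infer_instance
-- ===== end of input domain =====

-- B replaces A's single pass with four hard-coded if-blocks by a marker→key table
-- driving one per-field scan each (last matching line wins); same values, no speed claim.

-- shared helper: both Pythons contain the expression line.split("-")[-1].strip()
def extractField (line : String) : String :=
  PySem.Str.strip (((PySem.Str.split? line "-").getD []).getLastD "")

-- ===== PORT A =====
def parseInit : PySem.Dict String String :=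
  PySem.Dict.ofList [("hostname", ""), ("vendor", "tp-link"), ("platform", ""),
    ("model", ""), ("serial_number", ""), ("os_version", ""), ("hardware_version", "")]

def parseStep (data : PySem.Dict String String) (line : String) : PySem.Dict String String :=
  let data := if PySem.Str.isIn "System Name" line then data.insert "hostname" (extractField line) else data
  let data := if PySem.Str.isIn "Hardware Version" line then data.insert "hardware_version" (extractField line) else data
  let data := if PySem.Str.isIn "Software Version" line then data.insert "os_version" (extractField line) else data
  let data := if PySem.Str.isIn "Serial Number" line then data.insert "serial_number" (extractField line) else data
  data

def parse (raw_output : String) : List (String × String) :=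
  ((PySem.Str.splitlines raw_output).foldl parseStep parseInit).items

-- ===== PORT B =====
def markersB : List (String × String) :=
  [("System Name", "hostname"), ("Hardware Version", "hardware_version"),
   ("Software Version", "os_version"), ("Serial Number", "serial_number")]

-- [line.split("-")[-1].strip() for line in lines if marker in line][-1] if … else ""
def lastMatch (lines : List String) (marker : String) : String :=
  ((lines.filter (fun line => PySem.Str.isIn marker line)).map extractField).getLastD ""

def parse_alt (raw_output : String) : List (String × String) :=
  let lines := PySem.Str.splitlines raw_output
  let data : PySem.Dict String String :=
    PySem.Dict.ofList [("hostname", ""), ("vendor", "tp-link"), ("platform", ""),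
      ("model", ""), ("serial_number", ""), ("os_version", ""), ("hardware_version", "")]
  (markersB.foldl (fun d mk => d.insert mk.2 (lastMatch lines mk.1)) data).items

-- ===== PRECONDITION & SPEC =====
def Spec_parse (raw_output : String) (out : List (String × String)) : Prop := out = parse_alt raw_output
instance (raw_output : String) (out : List (String × String)) : Decidable (Spec_parse raw_output out) := by unfold Spec_parse; infer_instance

-- ===== CLAIM (what is proved, stated in full; the proofs are below) =====
def Claim_equal_parse : Prop := ∀ (raw_output : String), Dom_parse raw_output → Spec_parse raw_output (parse raw_output)

-- ===== LEMMAS AND PROOFS =====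

-- the dict both programs maintain, as a function of the four mutable fields
def pvD (h hw os sn : String) : PySem.Dict String String :=
  PySem.Dict.mk [("hostname", h), ("vendor", "tp-link"), ("platform", ""),
    ("model", ""), ("serial_number", sn), ("os_version", os), ("hardware_version", hw)]

theorem pvD_ins_h (h hw os sn x : String) : (pvD h hw os sn).insert "hostname" x = pvD x hw os sn := rfl
theorem pvD_ins_hw (h hw os sn x : String) : (pvD h hw os sn).insert "hardware_version" x = pvD h x os sn := rfl
theorem pvD_ins_os (h hw os sn x : String) : (pvD h hw os sn).insert "os_version" x = pvD h hw x sn := rfl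
theorem pvD_ins_sn (h hw os sn x : String) : (pvD h hw os sn).insert "serial_number" x = pvD h hw os x := rfl

theorem parseStep_pvD (h hw os sn : String) (l : String) :
    parseStep (pvD h hw os sn) l =
      pvD (if PySem.Str.isIn "System Name" l then extractField l else h)
          (if PySem.Str.isIn "Hardware Version" l then extractField l else hw)
          (if PySem.Str.isIn "Software Version" l then extractField l else os)
          (if PySem.Str.isIn "Serial Number" l then extractField l else sn) := by
  simp only [parseStep]
  split_ifs <;> simp [pvD_ins_h, pvD_ins_hw, pvD_ins_os, pvD_ins_sn]

theorem lastMatch_concat (ls : List String) (l m : String) :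
    lastMatch (ls ++ [l]) m =
      if PySem.Str.isIn m l then extractField l else lastMatch ls m := by
  simp only [lastMatch, List.filter_append, List.map_append]
  by_cases h : PySem.Chars.isIn m.toList l.toList = true <;>
    simp [PySem.Str.isIn, h]

theorem foldl_parseStep_eq (ls : List String) :
    ls.foldl parseStep parseInit =
      pvD (lastMatch ls "System Name") (lastMatch ls "Hardware Version")
          (lastMatch ls "Software Version") (lastMatch ls "Serial Number") := by
  induction ls using List.reverseRecOn with
  | nil => rfl
  | append_singleton ls l ih =>
      rw [List.foldl_append, List.foldl_cons, List.foldl_nil, ih, parseStep_pvD,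
        lastMatch_concat, lastMatch_concat, lastMatch_concat, lastMatch_concat]

theorem parse_alt_eq (raw_output : String) :
    parse_alt raw_output =
      (pvD (lastMatch (PySem.Str.splitlines raw_output) "System Name")
           (lastMatch (PySem.Str.splitlines raw_output) "Hardware Version")
           (lastMatch (PySem.Str.splitlines raw_output) "Software Version")
           (lastMatch (PySem.Str.splitlines raw_output) "Serial Number")).items := rfl

-- ===== VERDICT (by name: the statement is the Claim_ definition above) =====
theorem parse_spec : Claim_equal_parse := by
  intro raw_output _
  unfold Spec_parse parse
  rw [foldl_parseStep_eq, parse_alt_eq]
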